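-- pv_equiv track=rewrite | github.com/jonnynewburgh/cd-command-center | etl/load_headstart_pir.py | build_staff_code_map
-- ===== SOURCE A (Python) =====
-- def _find_col(descs, codes, *keywords):
--     """
--     Find column index where ALL keywords appear in the description (case-insensitive).
--     Returns the question code at that index, or None.
--     """
--     for i, desc in enumerate(descs):
--         if desc is None:
--             continue
--         d = str(desc).lower()
--         if all(kw.lower() in d for kw in keywords):
--             return codes[i] if i < len(codes) else None
--     return None
--
-- def build_staff_code_map(descs, codes):
--     """Build code map for Section B (staffing)."""
--     m = {}
--     m["total_staff"] = (
--         _find_col(descs, codes, "Total Head Start Staff")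
--         or _find_col(descs, codes, "Total Staff")
--     )
--     m["total_contracted_staff"] = (
--         _find_col(descs, codes, "Total Contracted Staff")
--     )
--     m["classroom_teachers"] = (
--         _find_col(descs, codes, "Classroom Teachers")
--     )
--     m["assistant_teachers"] = (
--         _find_col(descs, codes, "Assistant Teachers")
--     )
--     m["volunteers"] = (
--         _find_col(descs, codes, "Total Volunteers")
--     )
--     # BA+ teachers: advanced degree + baccalaureate lines
--     m["_teachers_advanced"] = (
--         _find_col(descs, codes, "Advanced degree", "early childhood", "Classroom Teachers")
--         or _find_col(descs, codes, "advanced degree", "Classroom Teachers")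
--     )
--     m["_teachers_bachelors"] = (
--         _find_col(descs, codes, "baccalaureate degree", "early childhood", "Classroom Teachers")
--         or _find_col(descs, codes, "baccalaureate degree", "Classroom Teachers")
--     )
--     return {k: v for k, v in m.items() if v is not None}
-- ===== SOURCE B (Python) =====
-- # B: single pass over descs recording, per keyword pattern, the first matching
-- # index; then one assembly pass over the output keys (same truthiness fallthrough
-- # as Python's `or`).
--
-- _PATTERNS = [
--     ("total head start staff",),
--     ("total staff",),
--     ("total contracted staff",),
--     ("classroom teachers",),
--     ("assistant teachers",),
--     ("total volunteers",),
--     ("advanced degree", "early childhood", "classroom teachers"),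
--     ("advanced degree", "classroom teachers"),
--     ("baccalaureate degree", "early childhood", "classroom teachers"),
--     ("baccalaureate degree", "classroom teachers"),
-- ]
--
-- _SPEC = [
--     ("total_staff", [0, 1]),
--     ("total_contracted_staff", [2]),
--     ("classroom_teachers", [3]),
--     ("assistant_teachers", [4]),
--     ("volunteers", [5]),
--     ("_teachers_advanced", [6, 7]),
--     ("_teachers_bachelors", [8, 9]),
-- ]
--
-- def build_staff_code_map(descs, codes):
--     """Build code map for Section B (staffing)."""
--     first = [None] * len(_PATTERNS)
--     for i, desc in enumerate(descs):
--         if desc is None: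
--             continue
--         d = str(desc).lower()
--         first = [o if o is not None else (i if all(kw in d for kw in pat) else None)
--                  for pat, o in zip(_PATTERNS, first)]
--     out = {}
--     for key, alt_idxs in _SPEC:
--         v = None
--         for j in alt_idxs:
--             i = first[j]
--             v = codes[i] if i is not None and i < len(codes) else None
--             if v:
--                 break
--         if v is not None:
--             out[key] = v
--     return out
-- ===== Notes on version B (the rewrite author's own statement) =====
-- stated objective: alternative
-- what changed: A rescans descs from the top once per _find_col call, lowercasing descriptions repeatedly; B makes a single pass over descs that lowercases each description once and records, per keyword pattern, the first matching index, then assembles the map from those recorded indices with the same or-fallthrough.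
import Mathlib
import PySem

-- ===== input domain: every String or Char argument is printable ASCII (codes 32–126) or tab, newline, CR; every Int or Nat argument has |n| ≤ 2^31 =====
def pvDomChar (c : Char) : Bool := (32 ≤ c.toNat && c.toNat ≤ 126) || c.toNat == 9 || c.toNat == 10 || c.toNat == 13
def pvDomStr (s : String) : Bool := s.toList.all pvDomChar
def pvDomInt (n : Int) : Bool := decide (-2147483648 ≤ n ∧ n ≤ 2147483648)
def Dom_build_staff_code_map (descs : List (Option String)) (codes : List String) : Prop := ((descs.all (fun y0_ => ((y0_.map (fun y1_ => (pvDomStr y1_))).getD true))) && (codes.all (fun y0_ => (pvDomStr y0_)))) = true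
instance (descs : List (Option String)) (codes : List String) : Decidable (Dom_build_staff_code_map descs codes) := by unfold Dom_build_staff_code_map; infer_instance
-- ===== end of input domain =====

-- B replaces A's one-scan-of-descs-per-pattern with a single pass over descs that
-- records each pattern's first matching index, then assembles the map from them
-- (alternative decomposition; same cost).


-- ===== PORT A =====
-- Python truthiness of an Optional[str]: None and "" are falsy (`x or y`).
def pvTruthy (a : Option String) : Bool :=
  match a with
  | none => false
  | some s => !s.toList.isEmpty

-- the `for i, desc in enumerate(descs)` loop of _find_col
def findColAux (codes : List String) (kws : List String) : List (Int × Option String) → Option String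
  | [] => none
  | (i, d?) :: rest =>
    match d? with
    | none => findColAux codes kws rest           -- `continue`
    | some desc =>
      let d := (PySem.Str.lower desc).toList
      if kws.all (fun kw => PySem.Chars.isIn (PySem.Chars.lower kw.toList) d) then
        (if i < (codes.length : Int) then PySem.List.pyGet? codes i else none)
      else findColAux codes kws rest

def findCol (descs : List (Option String)) (codes : List String) (kws : List String) : Option String :=
  findColAux codes kws (PySem.List.enumerate descs)

-- dict m has seven distinct literal keys inserted once each, then `{k: v for k, v in m.items() if v is not None}`:
-- represented as the insertion-order association list filtered of None values.
def build_staff_code_map (descs : List (Option String)) (codes : List String) : List (String × String) :=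
  let fc := findCol descs codes
  let pyOr := fun (a b : Option String) => if pvTruthy a then a else b   -- Python `a or b`
  let m : List (String × Option String) := [
    ("total_staff", pyOr (fc ["Total Head Start Staff"]) (fc ["Total Staff"])),
    ("total_contracted_staff", fc ["Total Contracted Staff"]),
    ("classroom_teachers", fc ["Classroom Teachers"]),
    ("assistant_teachers", fc ["Assistant Teachers"]),
    ("volunteers", fc ["Total Volunteers"]),
    ("_teachers_advanced", pyOr (fc ["Advanced degree", "early childhood", "Classroom Teachers"])
                                (fc ["advanced degree", "Classroom Teachers"])),
    ("_teachers_bachelors", pyOr (fc ["baccalaureate degree", "early childhood", "Classroom Teachers"])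
                                 (fc ["baccalaureate degree", "Classroom Teachers"]))
  ]
  m.filterMap (fun kv => kv.2.map (fun v => (kv.1, v)))

-- ===== PORT B =====
def pvPatterns : List (List String) := [
  ["total head start staff"],
  ["total staff"],
  ["total contracted staff"],
  ["classroom teachers"],
  ["assistant teachers"],
  ["total volunteers"],
  ["advanced degree", "early childhood", "classroom teachers"],
  ["advanced degree", "classroom teachers"],
  ["baccalaureate degree", "early childhood", "classroom teachers"],
  ["baccalaureate degree", "classroom teachers"]]

def pvSpec : List (String × List Nat) := [
  ("total_staff", [0, 1]),
  ("total_contracted_staff", [2]),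
  ("classroom_teachers", [3]),
  ("assistant_teachers", [4]),
  ("volunteers", [5]),
  ("_teachers_advanced", [6, 7]),
  ("_teachers_bachelors", [8, 9])]

-- one step of the scan: the list comprehension over zip(_PATTERNS, first)
def pvStep (i : Int) (d? : Option String) (first : List (Option Int)) : List (Option Int) :=
  match d? with
  | none => first                                  -- `continue`
  | some desc =>
    let d := (PySem.Str.lower desc).toList
    List.zipWith (fun pat o =>
        match o with
        | some k => some k
        | none => if pat.all (fun kw : String => PySem.Chars.isIn kw.toList d) then some i else none)
      pvPatterns first

def pvScan : List (Int × Option String) → List (Option Int) → List (Option Int)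
  | [], first => first
  | (i, d?) :: rest, first => pvScan rest (pvStep i d? first)

-- `codes[i] if i is not None and i < len(codes) else None`
def pvGetCode (codes : List String) (i? : Option Int) : Option String :=
  match i? with
  | none => none
  | some i => if i < (codes.length : Int) then PySem.List.pyGet? codes i else none

-- the inner `for j in alt_idxs: ...; if v: break` loop; v is the last computed value
def pvPick (codes : List String) (first : List (Option Int)) : List Nat → Option String
  | [] => none
  | [j] => pvGetCode codes (first.getD j none)
  | j :: rest =>
    let v := pvGetCode codes (first.getD j none)
    if pvTruthy v then v else pvPick codes first rest

def build_staff_code_map_alt (descs : List (Option String)) (codes : List String) : List (String × String) :=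
  let first := pvScan (PySem.List.enumerate descs) (pvPatterns.map (fun _ => none))
  pvSpec.filterMap (fun ka => (pvPick codes first ka.2).map (fun v => (ka.1, v)))

-- ===== PRECONDITION & SPEC =====
def Spec_build_staff_code_map (descs : List (Option String)) (codes : List String) (out : List (String × String)) : Prop := out = build_staff_code_map_alt descs codes
instance (descs : List (Option String)) (codes : List String) (out : List (String × String)) : Decidable (Spec_build_staff_code_map descs codes out) := by unfold Spec_build_staff_code_map; infer_instance

-- ===== CLAIM (what is proved, stated in full; the proofs are below) =====
def Claim_equal_build_staff_code_map : Prop := ∀ (descs : List (Option String)) (codes : List String), Dom_build_staff_code_map descs codes → Spec_build_staff_code_map descs codes (build_staff_code_map descs codes)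

-- ===== LEMMAS AND PROOFS =====

-- first index (in an enumerated list) whose non-None entry contains all of the given lowered keywords
def firstMatch (kwls : List (List Char)) : List (Int × Option String) → Option Int
  | [] => none
  | (i, d?) :: rest =>
    match d? with
    | none => firstMatch kwls rest
    | some desc =>
      if kwls.all (fun k => PySem.Chars.isIn k ((PySem.Str.lower desc).toList)) then some i
      else firstMatch kwls rest

lemma findColAux_eq (codes kws : List String) (l : List (Int × Option String)) :
    findColAux codes kws l =
      pvGetCode codes (firstMatch (kws.map (fun kw => PySem.Chars.lower kw.toList)) l) := by
  induction l with
  | nil => rfl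
  | cons p rest ih =>
    obtain ⟨i, d?⟩ := p
    cases d? with
    | none => simpa [findColAux, firstMatch] using ih
    | some desc =>
      have hall : ((kws.map (fun kw => PySem.Chars.lower kw.toList)).all
            (fun k => PySem.Chars.isIn k ((PySem.Str.lower desc).toList)))
          = (kws.all (fun kw => PySem.Chars.isIn (PySem.Chars.lower kw.toList) ((PySem.Str.lower desc).toList))) := by
        rw [List.all_map]; rfl
      simp only [findColAux, firstMatch, hall]
      cases hB : (kws.all (fun kw => PySem.Chars.isIn (PySem.Chars.lower kw.toList) ((PySem.Str.lower desc).toList))) with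
      | true => simp [pvGetCode]
      | false => simp [ih]

lemma pvScan_getD (l : List (Int × Option String)) (first : List (Option Int))
    (h : first.length = pvPatterns.length) (j : Nat) (hj : j < pvPatterns.length) :
    (pvScan l first).getD j none =
      (first.getD j none).or
        (firstMatch ((pvPatterns[j]).map (fun kw => kw.toList)) l) := by
  induction l generalizing first with
  | nil => simp [pvScan, firstMatch]
  | cons p rest ih =>
    obtain ⟨i, d?⟩ := p
    cases d? with
    | none =>
      simpa [pvScan, pvStep, firstMatch] using ih first h
    | some desc =>
      have hlen : (pvStep i (some desc) first).length = pvPatterns.length := by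
        simp [pvStep, h]
      have := ih (pvStep i (some desc) first) hlen
      rw [show pvScan ((i, some desc) :: rest) first = pvScan rest (pvStep i (some desc) first) from rfl, this]
      have hj' : j < first.length := by omega
      have hget : (pvStep i (some desc) first).getD j none =
          (match first.getD j none with
           | some k => some k
           | none => if (pvPatterns[j]).all (fun kw : String => PySem.Chars.isIn kw.toList ((PySem.Str.lower desc).toList)) then some i else none) := by
        simp only [pvStep]
        rw [List.getD_eq_getElem?_getD, List.getD_eq_getElem?_getD,
            List.getElem?_zipWith, List.getElem?_eq_getElem hj, List.getElem?_eq_getElem hj']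
        rfl
      rw [hget]
      cases hfj : first.getD j none with
      | some k => simp [firstMatch]
      | none =>
        have hall : (((pvPatterns[j]).map (fun kw => kw.toList)).all
              (fun k => PySem.Chars.isIn k ((PySem.Str.lower desc).toList)))
            = ((pvPatterns[j]).all (fun kw : String => PySem.Chars.isIn kw.toList ((PySem.Str.lower desc).toList))) := by
          rw [List.all_map]; rfl
        simp only [firstMatch, hall]
        cases hB : ((pvPatterns[j]).all (fun kw : String => PySem.Chars.isIn kw.toList ((PySem.Str.lower desc).toList))) with
        | true => simp
        | false => simp

-- ===== VERDICT (by name: the statement is the Claim_ definition above) =====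
theorem build_staff_code_map_spec : Claim_equal_build_staff_code_map := by
  intro descs codes _
  have hlen : (pvPatterns.map (fun _ => (none : Option Int))).length = pvPatterns.length := by
    simp
  have hinit : ∀ (j : Nat), ((pvPatterns.map (fun _ => (none : Option Int))).getD j none) = none := by
    intro j
    rw [List.getD_eq_getElem?_getD, List.getElem?_map]
    cases pvPatterns[j]? <;> rfl
  have hB : ∀ (j : Nat) (hj : j < pvPatterns.length),
      (pvScan (PySem.List.enumerate descs) (pvPatterns.map (fun _ => none))).getD j none =
        firstMatch ((pvPatterns[j]'hj).map (fun kw => kw.toList)) (PySem.List.enumerate descs) := by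
    intro j hj
    rw [pvScan_getD _ _ hlen j hj, hinit j]
    rfl
  have e : ∀ (j : Nat) (hj : j < pvPatterns.length) (kws : List String),
      ((pvPatterns[j]'hj).map (fun kw => kw.toList)) = (kws.map (fun kw => PySem.Chars.lower kw.toList)) →
      pvGetCode codes ((pvScan (PySem.List.enumerate descs) (pvPatterns.map (fun _ => none))).getD j none) =
        findCol descs codes kws := by
    intro j hj kws hk
    rw [hB j hj, hk, findCol, findColAux_eq]
  have h0 := e 0 (by decide) ["Total Head Start Staff"] (by decide)
  have h1 := e 1 (by decide) ["Total Staff"] (by decide)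
  have h2 := e 2 (by decide) ["Total Contracted Staff"] (by decide)
  have h3 := e 3 (by decide) ["Classroom Teachers"] (by decide)
  have h4 := e 4 (by decide) ["Assistant Teachers"] (by decide)
  have h5 := e 5 (by decide) ["Total Volunteers"] (by decide)
  have h6 := e 6 (by decide) ["Advanced degree", "early childhood", "Classroom Teachers"] (by decide)
  have h7 := e 7 (by decide) ["advanced degree", "Classroom Teachers"] (by decide)
  have h8 := e 8 (by decide) ["baccalaureate degree", "early childhood", "Classroom Teachers"] (by decide)
  have h9 := e 9 (by decide) ["baccalaureate degree", "Classroom Teachers"] (by decide)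
  unfold Spec_build_staff_code_map build_staff_code_map build_staff_code_map_alt
  simp only [pvSpec, List.filterMap_cons, List.filterMap_nil, pvPick, h0, h1, h2, h3, h4, h5, h6, h7, h8, h9]
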